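-- pv_equiv track=rewrite | github.com/Hayle-HB/Copitative-Programing | Daily Problem Solving challenge/Day 10/E_Counting_Binary_Strings.py | count_binary_strings
-- ===== SOURCE A (Python) =====
-- MOD = 998244353
--
-- def count_binary_strings(n, k):
--     dp = [[0] * (n + 1) for _ in range(n + 1)]
--     dp[0][0] = 1
--
--     for i in range(1, n + 1):
--         for j in range(1, i + 1):
--             dp[i][j] = (dp[i - 1][j] + dp[i - 1][j - 1] * (i - j + 1)) % MOD
--
--     result = 0
--     for j in range(1, k + 1):
--         result = (result + dp[n][j]) % MOD
--
--     return result
-- ===== SOURCE B (Python) =====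
-- MOD = 998244353
--
-- def count_binary_strings(n, k):
--     # Work along diagonals d = i - j: g[d] holds dp[j+d][j] for the current j.
--     # The original recurrence becomes g_new[d] = g_new[d-1] + (d+1)*g_old[d],
--     # i.e. each pass over j is a weighted running prefix sum of a 1-D array,
--     # and pass j contributes g[n-j] = dp[n][j] to the answer.
--     g = [1] + [0] * n
--     total = 0
--     for j in range(1, k + 1):
--         s = 0
--         for d in range(n + 1):
--             s = (s + (d + 1) * g[d]) % MOD
--             g[d] = s
--         total = (total + g[n - j]) % MOD
--     return total
-- ===== Notes on version B (the rewrite author's own statement) =====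
-- stated objective: alternative
-- what changed: Replaces the 2-D table fill over all (i,j) by a diagonal reindexing d=i-j under which each pass in j is a weighted running prefix sum of a single 1-D array, sampling one entry g[n-j]=dp[n][j] per pass into the answer; only k passes of length n+1 are made instead of the full n-by-n triangle.
import Mathlib
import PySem

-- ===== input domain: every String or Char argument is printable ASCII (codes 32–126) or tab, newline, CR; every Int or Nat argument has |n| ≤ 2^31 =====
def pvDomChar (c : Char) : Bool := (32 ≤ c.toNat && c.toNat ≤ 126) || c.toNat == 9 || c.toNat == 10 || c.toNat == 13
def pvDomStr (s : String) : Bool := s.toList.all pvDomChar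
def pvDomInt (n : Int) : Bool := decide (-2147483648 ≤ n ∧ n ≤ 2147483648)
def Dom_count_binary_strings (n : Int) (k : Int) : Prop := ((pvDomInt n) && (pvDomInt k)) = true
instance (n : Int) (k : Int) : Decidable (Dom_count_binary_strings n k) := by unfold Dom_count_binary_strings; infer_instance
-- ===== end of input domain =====

-- B reindexes the table along diagonals d = i - j: each pass in j is a weighted running
-- prefix sum of one 1-D array, and pass j contributes g[n-j] = dp[n][j] to the answer;
-- k passes over one length-(n+1) array instead of the full triangle. Objective: alternative.

-- ===== PORT A =====
-- inner loop body: dp[i][j] = (dp[i-1][j] + dp[i-1][j-1]*(i-j+1)) % MOD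
def cbsInner (i : Int) (dp : List (List Int)) (j : Int) : List (List Int) :=
  dp.set i.toNat ((dp.getD i.toNat []).set j.toNat
    (PySem.Int.mod ((dp.getD (i-1).toNat []).getD j.toNat 0
      + (dp.getD (i-1).toNat []).getD (j-1).toNat 0 * (i - j + 1)) 998244353))

-- outer loop body: for j in range(1, i+1)
def cbsOuter (dp : List (List Int)) (i : Int) : List (List Int) :=
  (PySem.List.pyRange 1 (i+1) 1).foldl (cbsInner i) dp

def count_binary_strings (n : Int) (k : Int) : Int :=
  let dp0 : List (List Int) :=
    List.replicate (n+1).toNat (List.replicate (n+1).toNat 0)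
  let dp1 := dp0.set 0 ((dp0.getD 0 []).set 0 1)
  let dp := (PySem.List.pyRange 1 (n+1) 1).foldl cbsOuter dp1
  (PySem.List.pyRange 1 (k+1) 1).foldl
    (fun result j =>
      PySem.Int.mod (result + (dp.getD n.toNat []).getD j.toNat 0) 998244353) 0

-- ===== PORT B =====
-- inner pass: for d in range(n+1): s = (s + (d+1)*g[d]) % MOD; g[d] = s
def cbsAltScan (n : Int) (g : List Int) : Int × List Int :=
  (PySem.List.pyRange 0 (n+1) 1).foldl
    (fun (p : Int × List Int) d =>
       let s := PySem.Int.mod (p.1 + (d+1) * p.2.getD d.toNat 0) 998244353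
       (s, p.2.set d.toNat s)) (0, g)

def count_binary_strings_alt (n : Int) (k : Int) : Int :=
  ((PySem.List.pyRange 1 (k+1) 1).foldl
    (fun (p : List Int × Int) j =>
      let g := (cbsAltScan n p.1).2
      (g, PySem.Int.mod (p.2 + g.getD (n-j).toNat 0) 998244353))
    (1 :: List.replicate n.toNat 0, 0)).2

-- ===== PRECONDITION & SPEC =====
-- Pre_ excludes exactly the inputs where A raises IndexError: n < 0 (dp[0][0] on an empty table)
-- and k > n (dp[n][j] for j > n in the summation loop).
def Pre_count_binary_strings (n : Int) (k : Int) : Prop := 0 ≤ n ∧ k ≤ n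
instance (n : Int) (k : Int) : Decidable (Pre_count_binary_strings n k) := by
  unfold Pre_count_binary_strings; infer_instance

def pvWitness_count_binary_strings : Int × Int := (5, 3)

def Spec_count_binary_strings (n : Int) (k : Int) (out : Int) : Prop := out = count_binary_strings_alt n k
instance (n : Int) (k : Int) (out : Int) : Decidable (Spec_count_binary_strings n k out) := by unfold Spec_count_binary_strings; infer_instance

-- ===== CLAIM (what is proved, stated in full; the proofs are below) =====
def Claim_equal_count_binary_strings : Prop := ∀ (n : Int) (k : Int), Dom_count_binary_strings n k → Pre_count_binary_strings n k → Spec_count_binary_strings n k (count_binary_strings n k)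

-- ===== LEMMAS AND PROOFS =====

-- pure value of A's table entry dp[i][j]
def Dv : Nat → Nat → Int
  | 0, 0 => 1
  | 0, _+1 => 0
  | _+1, 0 => 0
  | i+1, j+1 =>
    if j + 1 ≤ i + 1 then
      PySem.Int.mod (Dv i (j+1) + Dv i j * (((i:Int)+1) - (((j:Int))+1) + 1)) 998244353
    else 0

-- pure value of B's diagonal array after pass j: Gv j d = dp[j+d][j]
def GvRow (prev : Nat → Int) : Nat → Int
  | 0 => PySem.Int.mod (0 + ((0:Int)+1) * prev 0) 998244353
  | d+1 => PySem.Int.mod (GvRow prev d + (((d:Int)+1)+1) * prev (d+1)) 998244353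

def Gv : Nat → Nat → Int
  | 0 => fun d => match d with | 0 => 1 | _+1 => 0
  | j+1 => GvRow (Gv j)

theorem Dv_zero_of_lt : ∀ i j, i < j → Dv i j = 0 := by
  intro i j h
  match i, j, h with
  | 0, j+1, _ => rfl
  | i+1, j+1, h =>
    show (if j + 1 ≤ i + 1 then _ else (0:Int)) = 0
    rw [if_neg (by omega)]

theorem Dv_zero_left : ∀ i, 1 ≤ i → Dv i 0 = 0 := by
  intro i h
  match i, h with
  | i+1, _ => rfl

-- the diagonal values are exactly A's table values: Gv j d = dp[j+d][j]
theorem Dv_eq_Gv : ∀ j d, Dv (j + d) j = Gv j d := by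
  intro j
  induction j with
  | zero =>
    intro d
    match d with
    | 0 => rfl
    | d+1 => exact Dv_zero_left (0 + (d+1)) (by omega)
  | succ j ihj =>
    intro d
    induction d with
    | zero =>
      show Dv (j+1) (j+1) = Gv (j+1) 0
      have hDv : Dv (j+1) (j+1)
          = if j + 1 ≤ j + 1 then
              PySem.Int.mod (Dv j (j+1) + Dv j j * (((j:Int)+1) - (((j:Int))+1) + 1)) 998244353
            else 0 := rfl
      have hGv : Gv (j+1) 0 = PySem.Int.mod (0 + ((0:Int)+1) * Gv j 0) 998244353 := rfl
      rw [hDv, if_pos (le_refl _), hGv, Dv_zero_of_lt j (j+1) (by omega)]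
      have hj : Dv j j = Gv j 0 := by simpa using ihj 0
      rw [hj]
      congr 1
      ring
    | succ d ihd =>
      have he : j + 1 + (d + 1) = (j + d + 1) + 1 := by omega
      rw [he]
      have hDv : Dv ((j+d+1)+1) (j+1)
          = if j + 1 ≤ (j+d+1) + 1 then
              PySem.Int.mod (Dv (j+d+1) (j+1) + Dv (j+d+1) j * ((((j+d+1:Nat)):Int)+1 - (((j:Int))+1) + 1)) 998244353
            else 0 := rfl
      have hGv : Gv (j+1) (d+1)
          = PySem.Int.mod (Gv (j+1) d + (((d:Int)+1)+1) * Gv j (d+1)) 998244353 := rfl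
      rw [hDv, if_pos (by omega), hGv]
      have h1 : Dv (j+d+1) (j+1) = Gv (j+1) d := by
        have : j + 1 + d = j + d + 1 := by omega
        rw [← this]; exact ihd
      have h2 : Dv (j+d+1) j = Gv j (d+1) := by
        have : j + (d+1) = j + d + 1 := by omega
        rw [← this]; exact ihj (d+1)
      rw [h1, h2]
      congr 1
      push_cast
      ring

-- ================= A-side table characterization =================

def dpRow (N i : Nat) : List Int := (List.range N).map (Dv i)

def partRow (N i t : Nat) : List Int :=
  (List.range N).map (fun j => if 1 ≤ j ∧ j ≤ t then Dv i j else 0)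

def dpState (N i : Nat) : List (List Int) :=
  (List.range N).map (fun r => if r ≤ i then dpRow N r else List.replicate N 0)

theorem getD_set_self {α : Type} (l : List α) (i : Nat) (v d : α) (h : i < l.length) :
    (l.set i v).getD i d = v := by
  rw [List.getD_eq_getElem?_getD, List.getElem?_set_self h]
  rfl

theorem getD_set_ne {α : Type} (l : List α) {i j : Nat} (v : α) (d : α) (h : i ≠ j) :
    (l.set i v).getD j d = l.getD j d := by
  rw [List.getD_eq_getElem?_getD, List.getElem?_set_ne h, ← List.getD_eq_getElem?_getD]

theorem set_map_range {α : Type} (f : Nat → α) (N j : Nat) (v : α) :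
    ((List.range N).map f).set j v
      = (List.range N).map (fun x => if x = j then v else f x) := by
  apply List.ext_getElem
  · simp
  · intro x h1 h2
    simp only [List.getElem_set, List.getElem_map, List.getElem_range]
    by_cases hx : j = x
    · subst hx; simp
    · rw [if_neg hx, if_neg (by omega)]

theorem partRow_zero (N i : Nat) : partRow N i 0 = List.replicate N 0 := by
  unfold partRow
  have h0 : ∀ j : ℕ, (if 1 ≤ j ∧ j ≤ 0 then Dv i j else 0) = (0:Int) := by
    intro j; rw [if_neg (by omega)]
  simp only [h0]
  rw [List.map_const']
  simp

theorem dpRow_getD (N i j : Nat) (h : j < N) : (dpRow N i).getD j 0 = Dv i j :=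
  PySem.List.getD_map_range _ _ _ _ h

theorem dpState_getD (N i r : Nat) (h : r < N) :
    (dpState N i).getD r []
      = if r ≤ i then dpRow N r else List.replicate N 0 :=
  PySem.List.getD_map_range _ _ _ _ h

theorem length_dpState (N i : Nat) : (dpState N i).length = N := by
  simp [dpState]

theorem partRow_last (N i : Nat) (hi : 1 ≤ i) : partRow N i i = dpRow N i := by
  unfold partRow dpRow
  apply List.map_congr_left
  intro j _
  by_cases h1 : 1 ≤ j
  · by_cases h2 : j ≤ i
    · rw [if_pos ⟨h1, h2⟩]
    · rw [if_neg (by omega), Dv_zero_of_lt i j (by omega)]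
  · have hj0 : j = 0 := by omega
    subst hj0
    rw [if_neg (by omega), Dv_zero_left i hi]

theorem partRow_set (N i j : Nat) (hj : 1 ≤ j) :
    (partRow N i (j-1)).set j (Dv i j) = partRow N i j := by
  unfold partRow
  rw [set_map_range]
  apply List.map_congr_left
  intro x _
  by_cases hx : x = j
  · subst hx
    rw [if_pos rfl, if_pos ⟨hj, le_refl x⟩]
  · rw [if_neg hx]
    have hiff : (1 ≤ x ∧ x ≤ j - 1) ↔ (1 ≤ x ∧ x ≤ j) := by omega
    simp only [hiff]

theorem dv_mod_step (i j : Nat) (hi : 1 ≤ i) (hj : 1 ≤ j) (hji : j ≤ i) :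
    PySem.Int.mod (Dv (i-1) j + Dv (i-1) (j-1) * ((i:Int) - (j:Int) + 1)) 998244353
      = Dv i j := by
  obtain ⟨i', rfl⟩ : ∃ i', i = i' + 1 := ⟨i - 1, by omega⟩
  obtain ⟨j', rfl⟩ : ∃ j', j = j' + 1 := ⟨j - 1, by omega⟩
  have hDv : Dv (i'+1) (j'+1)
      = if j' + 1 ≤ i' + 1 then
          PySem.Int.mod (Dv i' (j'+1) + Dv i' j' * (((i':Int)+1) - (((j':Int))+1) + 1)) 998244353
        else 0 := rfl
  rw [hDv, if_pos (by omega)]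
  simp only [Nat.add_sub_cancel]
  congr 1

theorem cbsInner_step (N i j : Nat) (hiN : i < N) (hi : 1 ≤ i) (hj : 1 ≤ j) (hji : j ≤ i) :
    cbsInner (i:Int) ((dpState N (i-1)).set i (partRow N i (j-1))) (j:Int)
      = (dpState N (i-1)).set i (partRow N i j) := by
  unfold cbsInner
  have hti : ((i:Int)).toNat = i := by omega
  have hti1 : ((i:Int) - 1).toNat = i - 1 := by omega
  have htj : ((j:Int)).toNat = j := by omega
  have htj1 : ((j:Int) - 1).toNat = j - 1 := by omega
  rw [hti, hti1, htj, htj1]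
  have hgd : ((dpState N (i-1)).set i (partRow N i (j-1))).getD (i-1) [] = dpRow N (i-1) := by
    rw [getD_set_ne _ _ _ (by omega)]
    rw [dpState_getD N (i-1) (i-1) (by omega), if_pos (le_refl _)]
  have hgi : ((dpState N (i-1)).set i (partRow N i (j-1))).getD i []
      = partRow N i (j-1) :=
    getD_set_self _ _ _ _ (by rw [length_dpState]; exact hiN)
  rw [hgd, hgi, dpRow_getD N (i-1) j (by omega), dpRow_getD N (i-1) (j-1) (by omega)]
  rw [dv_mod_step i j hi hj hji, partRow_set N i j hj, List.set_set]

theorem inner_fold (N i : Nat) (hiN : i < N) (hi : 1 ≤ i) :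
    ∀ t, t ≤ i →
      List.foldl (cbsInner (i:Int)) ((dpState N (i-1)).set i (partRow N i 0))
          (PySem.List.pyRange 1 ((t:Int)+1) 1)
        = (dpState N (i-1)).set i (partRow N i t) := by
  intro t
  induction t with
  | zero =>
    intro _
    rw [show ((0:Nat):Int) + 1 = 1 by norm_num, PySem.List.pyRange_one_eq_nil (le_refl _)]
    rfl
  | succ t ih =>
    intro ht
    rw [show (((t+1:Nat)):Int) + 1 = ((t:Int) + 1) + 1 by push_cast; ring]
    rw [PySem.List.pyRange_one_succ_right (by omega : (1:Int) ≤ (t:Int) + 1)]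
    rw [List.foldl_append, ih (by omega)]
    show cbsInner (i:Int) _ ((t:Int)+1) = _
    rw [show ((t:Int) + 1) = (((t+1:Nat)):Int) by push_cast; ring]
    exact cbsInner_step N i (t+1) hiN hi (by omega) ht

theorem cbsOuter_step (N i : Nat) (hiN : i < N) (hi : 1 ≤ i) :
    cbsOuter (dpState N (i-1)) (i:Int) = dpState N i := by
  unfold cbsOuter
  have e0 : dpState N (i-1) = (dpState N (i-1)).set i (partRow N i 0) := by
    rw [partRow_zero]
    apply List.ext_getElem
    · simp
    · intro r h1 h2
      rw [List.getElem_set]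
      by_cases hr : i = r
      · subst hr
        unfold dpState
        rw [if_pos (by simp)]
        rw [List.getElem_map, List.getElem_range, if_neg (by omega)]
      · rw [if_neg hr]
  conv_lhs => rw [e0]
  rw [inner_fold N i hiN hi i (le_refl i)]
  apply List.ext_getElem
  · simp [length_dpState]
  · intro r h1 h2
    rw [List.getElem_set]
    by_cases hr : i = r
    · subst hr
      rw [if_pos rfl, partRow_last N i hi]
      unfold dpState
      rw [List.getElem_map, List.getElem_range, if_pos (le_refl i)]
    · rw [if_neg hr]
      unfold dpState
      rw [List.getElem_map, List.getElem_range, List.getElem_map, List.getElem_range]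
      have : r ≤ i - 1 ↔ r ≤ i := by
        simp only [List.length_set, length_dpState] at h1
        omega
      simp only [this]

theorem outer_fold (N n' : Nat) (hN : n' < N) :
    ∀ t, t ≤ n' →
      List.foldl cbsOuter (dpState N 0) (PySem.List.pyRange 1 ((t:Int)+1) 1) = dpState N t := by
  intro t
  induction t with
  | zero =>
    intro _
    rw [show ((0:Nat):Int) + 1 = 1 by norm_num, PySem.List.pyRange_one_eq_nil (le_refl _)]
    rfl
  | succ t ih =>
    intro ht
    rw [show (((t+1:Nat)):Int) + 1 = ((t:Int) + 1) + 1 by push_cast; ring]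
    rw [PySem.List.pyRange_one_succ_right (by omega : (1:Int) ≤ (t:Int) + 1)]
    rw [List.foldl_append, ih (by omega)]
    show cbsOuter _ ((t:Int)+1) = _
    rw [show ((t:Int) + 1) = (((t+1:Nat)):Int) by push_cast; ring]
    have := cbsOuter_step N (t+1) (by omega) (by omega)
    simpa using this

theorem init_eq (N : Nat) (hN : 1 ≤ N) :
    (List.replicate N (List.replicate N (0:Int))).set 0
        (((List.replicate N (List.replicate N (0:Int))).getD 0 []).set 0 1)
      = dpState N 0 := by
  rw [List.getD_replicate _ (by omega)]
  apply List.ext_getElem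
  · simp [length_dpState]
  · intro r h1 h2
    rw [List.getElem_set]
    unfold dpState
    rw [List.getElem_map, List.getElem_range]
    by_cases hr : (0:Nat) = r
    · subst hr
      rw [if_pos rfl, if_pos (le_refl _)]
      unfold dpRow
      apply List.ext_getElem
      · simp
      · intro x hx1 hx2
        rw [List.getElem_set, List.getElem_map, List.getElem_range]
        by_cases hx : (0:Nat) = x
        · subst hx; rw [if_pos rfl]; rfl
        · rw [if_neg hx]
          rw [List.getElem_replicate]
          obtain ⟨x', rfl⟩ : ∃ x', x = x' + 1 := ⟨x - 1, by omega⟩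
          rfl
    · rw [if_neg hr, if_neg (by omega), List.getElem_replicate]

-- ================= B-side scan characterization =================

-- the diagonal array mid-pass: entries before t already updated to pass j+1
def mixRow (N j t : Nat) : List Int :=
  (List.range N).map (fun d => if d < t then Gv (j+1) d else Gv j d)

-- running-sum value after t inner steps
def sVal (j t : Nat) : Int := if t = 0 then 0 else Gv (j+1) (t-1)

theorem mixRow_zero (N j : Nat) : mixRow N j 0 = (List.range N).map (Gv j) := by
  unfold mixRow
  apply List.map_congr_left
  intro d _
  rw [if_neg (by omega)]

theorem mixRow_full (N j : Nat) : mixRow N j N = (List.range N).map (Gv (j+1)) := by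
  unfold mixRow
  apply List.map_congr_left
  intro d hd
  rw [List.mem_range] at hd
  rw [if_pos hd]

theorem sVal_step (j t : Nat) :
    PySem.Int.mod (sVal j t + (((t:Nat):Int)+1) * Gv j t) 998244353 = Gv (j+1) t := by
  match t with
  | 0 =>
    show PySem.Int.mod (0 + ((0:Int)+1) * Gv j 0) 998244353 = Gv (j+1) 0
    rfl
  | t+1 =>
    show PySem.Int.mod (Gv (j+1) t + (((t+1:Nat):Int)+1) * Gv j (t+1)) 998244353 = Gv (j+1) (t+1)
    have hGv : Gv (j+1) (t+1)
        = PySem.Int.mod (Gv (j+1) t + (((t:Int)+1)+1) * Gv j (t+1)) 998244353 := rfl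
    rw [hGv]
    congr 2

theorem mixRow_set (N j t : Nat) :
    (mixRow N j t).set t (Gv (j+1) t) = mixRow N j (t+1) := by
  unfold mixRow
  rw [set_map_range]
  apply List.map_congr_left
  intro x _
  by_cases hx : x = t
  · subst hx
    rw [if_pos rfl, if_pos (by omega)]
  · rw [if_neg hx]
    have hiff : (x < t) ↔ (x < t + 1) := by omega
    simp only [hiff]

theorem scan_fold (N j : Nat) :
    ∀ t, t ≤ N →
      List.foldl
        (fun (p : Int × List Int) d =>
           let s := PySem.Int.mod (p.1 + (d+1) * p.2.getD d.toNat 0) 998244353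
           (s, p.2.set d.toNat s))
        (0, mixRow N j 0) (PySem.List.pyRange 0 ((t:Int)) 1)
      = (sVal j t, mixRow N j t) := by
  intro t
  induction t with
  | zero =>
    intro _
    rw [show ((0:Nat):Int) = 0 by norm_num, PySem.List.pyRange_one_eq_nil (le_refl _)]
    rfl
  | succ t ih =>
    intro ht
    rw [show (((t+1:Nat)):Int) = ((t:Int)) + 1 by push_cast; ring]
    rw [PySem.List.pyRange_one_succ_right (by omega : (0:Int) ≤ (t:Int))]
    rw [List.foldl_append, ih (by omega), List.foldl_cons, List.foldl_nil]
    show (PySem.Int.mod (sVal j t + ((t:Int)+1) * (mixRow N j t).getD ((t:Int)).toNat 0) 998244353,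
          (mixRow N j t).set ((t:Int)).toNat
            (PySem.Int.mod (sVal j t + ((t:Int)+1) * (mixRow N j t).getD ((t:Int)).toNat 0) 998244353))
        = (sVal j (t+1), mixRow N j (t+1))
    have htt : ((t:Int)).toNat = t := by omega
    rw [htt]
    have hget : (mixRow N j t).getD t 0 = Gv j t := by
      unfold mixRow
      rw [PySem.List.getD_map_range _ _ _ _ (by omega), if_neg (by omega)]
    rw [hget, sVal_step j t, mixRow_set N j t]
    have hs : sVal j (t+1) = Gv (j+1) t := by unfold sVal; rw [if_neg (by omega)]; rfl
    rw [hs]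

theorem cbsAltScan_eq (n' j : Nat) :
    (cbsAltScan ((n':Nat):Int) ((List.range (n'+1)).map (Gv j))).2
      = (List.range (n'+1)).map (Gv (j+1)) := by
  unfold cbsAltScan
  rw [← mixRow_zero (n'+1) j]
  rw [show ((n':Nat):Int) + 1 = (((n'+1:Nat)):Int) by push_cast; ring]
  rw [scan_fold (n'+1) j (n'+1) (le_refl _), mixRow_full]

-- initial array [1] + [0]*n is pass-0 of the diagonal values
theorem row0_eq_G (n' : Nat) :
    (1:Int) :: List.replicate n' 0 = (List.range (n'+1)).map (Gv 0) := by
  rw [List.range_succ_eq_map, List.map_cons, List.map_map]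
  have h0 : (List.range n').map (Gv 0 ∘ Nat.succ) = (List.range n').map (fun _ => (0:Int)) :=
    List.map_congr_left (fun x _ => rfl)
  rw [h0, List.map_const']
  simp [Gv]

-- ================= joint outer fold =================

theorem outer_eq (n' : Nat) :
    ∀ t, t ≤ n' →
      List.foldl
        (fun (p : List Int × Int) j =>
          let g := (cbsAltScan ((n':Nat):Int) p.1).2
          (g, PySem.Int.mod (p.2 + g.getD (((n':Nat):Int)-j).toNat 0) 998244353))
        ((List.range (n'+1)).map (Gv 0), 0) (PySem.List.pyRange 1 ((t:Int)+1) 1)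
      = ((List.range (n'+1)).map (Gv t),
         List.foldl
           (fun result j =>
             PySem.Int.mod (result + (dpRow (n'+1) n').getD j.toNat 0) 998244353)
           0 (PySem.List.pyRange 1 ((t:Int)+1) 1)) := by
  intro t
  induction t with
  | zero =>
    intro _
    rw [show ((0:Nat):Int) + 1 = 1 by norm_num, PySem.List.pyRange_one_eq_nil (le_refl _)]
    rfl
  | succ t ih =>
    intro ht
    rw [show (((t+1:Nat)):Int) + 1 = ((t:Int) + 1) + 1 by push_cast; ring]
    rw [PySem.List.pyRange_one_succ_right (by omega : (1:Int) ≤ (t:Int) + 1)]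
    rw [List.foldl_append, List.foldl_append, ih (by omega),
        List.foldl_cons, List.foldl_nil, List.foldl_cons, List.foldl_nil]
    have hscan : (cbsAltScan ((n':Nat):Int) ((List.range (n'+1)).map (Gv t))).2
        = (List.range (n'+1)).map (Gv (t+1)) := cbsAltScan_eq n' t
    show ((cbsAltScan ((n':Nat):Int) ((List.range (n'+1)).map (Gv t))).2,
          PySem.Int.mod (_ + ((cbsAltScan ((n':Nat):Int) ((List.range (n'+1)).map (Gv t))).2).getD
            (((n':Nat):Int)-((t:Int)+1)).toNat 0) 998244353) = _
    rw [hscan]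
    have hidx : (((n':Nat):Int)-((t:Int)+1)).toNat = n' - (t+1) := by omega
    rw [hidx]
    have hget : ((List.range (n'+1)).map (Gv (t+1))).getD (n'-(t+1)) 0 = Gv (t+1) (n'-(t+1)) :=
      PySem.List.getD_map_range _ _ _ _ (by omega)
    rw [hget]
    have hdv : Gv (t+1) (n'-(t+1)) = Dv n' (t+1) := by
      rw [← Dv_eq_Gv (t+1) (n'-(t+1))]
      congr 1
      omega
    have htn : ((t:Int)+1).toNat = t + 1 := by omega
    rw [hdv, htn, dpRow_getD (n'+1) n' (t+1) (by omega)]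

-- ===== VERDICT (by name: the statement is the Claim_ definition above) =====
theorem count_binary_strings_spec : Claim_equal_count_binary_strings := by
  intro n k _hdom hpre
  unfold Spec_count_binary_strings
  obtain ⟨hn, hk⟩ := hpre
  obtain ⟨n', rfl⟩ : ∃ n' : Nat, n = (n' : Int) := ⟨n.toNat, by omega⟩
  simp only [count_binary_strings, count_binary_strings_alt]
  rcases le_or_gt k 0 with hk0 | hk1
  · rw [PySem.List.pyRange_one_eq_nil (by omega : k + 1 ≤ 1)]
    rfl
  · obtain ⟨k', rfl⟩ : ∃ k' : Nat, k = (k' : Int) := ⟨k.toNat, by omega⟩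
    have hk'n : k' ≤ n' := by omega
    rw [show (((n':Nat):Int) + 1).toNat = n' + 1 by omega]
    rw [init_eq (n'+1) (by omega)]
    rw [outer_fold (n'+1) n' (by omega) n' (le_refl _)]
    rw [show (((n':Nat):Int)).toNat = n' by omega]
    rw [dpState_getD (n'+1) n' n' (by omega), if_pos (le_refl _)]
    rw [row0_eq_G n']
    rw [show ((k':Nat):Int) + 1 = (((k':Nat)):Int) + 1 by ring]
    rw [outer_eq n' k' hk'n]
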